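-- pv_equiv track=rewrite | github.com/ilyaskalimullinn/alpha_representation | app/graph.py | build_faces_matrix
-- ===== SOURCE A (Python) =====
-- from typing import List, Tuple, Dict, Any
--
-- def build_faces_matrix(faces: List[List[int]]) -> List[List[List[int]]]:
--     """
--     Build FacesMatrix from list of faces of a planar cubic graph.
--
--     Example:
--     ```
--     faces = [
--         [0, 1, 2],
--         [0, 1, 3],
--         [1, 2, 3],
--         [0, 2, 3]
--     ]
--     ```
--     These are all faces of graph $K_4$ with vertices 0,1,2,3
--     ```
--     faces_matrix = [
--         [[0,1,2], [0,1], [1,2], [0,2]],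
--         [[0,1], [0,1,3], [1,3], [0,3]],
--         [[1,2], [1,3], [1,2,3], [2,3]],
--         [[0,2], [0,3], [2,3], [0,2,3]]
--     ]
--     ```
--
--     Args:
--         faces (List[List[int]]): a list of faces, each face is a list of
--             vertices in that face
--
--     Returns:
--         List[List[List[int]]]: Faces Matrix `fm`, where `fm[i][j]` is
--             a list of all vertices that are present both in face `i` and face `j`
--     """
--     n_faces = len(faces)
--     matrix = [[None for _ in range(n_faces)] for _ in range(n_faces)]
--     for i, face in enumerate(faces):
--         matrix[i][i] = sorted(list(set(face)))
--     for i in range(n_faces):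
--         for j in range(i + 1, n_faces):
--             v = set(faces[i]).intersection(faces[j])
--             v = sorted(list(v))
--             matrix[i][j] = v
--             matrix[j][i] = v
--     return matrix
-- ===== SOURCE B (Python) =====
-- def build_faces_matrix(faces):
--     """Inverted index vertex -> face indices; scatter each vertex (in sorted
--     order) into every matrix cell of a pair of faces containing it."""
--     n_faces = len(faces)
--     index = {}
--     for i, face in enumerate(faces):
--         for v in sorted(set(face)):
--             index.setdefault(v, []).append(i)
--     matrix = [[[] for _ in range(n_faces)] for _ in range(n_faces)]
--     for v in sorted(index):
--         fs = index[v]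
--         for i in fs:
--             for j in fs:
--                 matrix[i][j].append(v)
--     return matrix
-- ===== Notes on version B (the rewrite author's own statement) =====
-- stated objective: alternative
-- what changed: replaces A's per-pair set-intersection-and-sort over all O(n^2) face pairs by an inverted index vertex->faces built in one pass, then scatters each vertex in globally sorted order into the cells of all pairs of faces containing it
import Mathlib
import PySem

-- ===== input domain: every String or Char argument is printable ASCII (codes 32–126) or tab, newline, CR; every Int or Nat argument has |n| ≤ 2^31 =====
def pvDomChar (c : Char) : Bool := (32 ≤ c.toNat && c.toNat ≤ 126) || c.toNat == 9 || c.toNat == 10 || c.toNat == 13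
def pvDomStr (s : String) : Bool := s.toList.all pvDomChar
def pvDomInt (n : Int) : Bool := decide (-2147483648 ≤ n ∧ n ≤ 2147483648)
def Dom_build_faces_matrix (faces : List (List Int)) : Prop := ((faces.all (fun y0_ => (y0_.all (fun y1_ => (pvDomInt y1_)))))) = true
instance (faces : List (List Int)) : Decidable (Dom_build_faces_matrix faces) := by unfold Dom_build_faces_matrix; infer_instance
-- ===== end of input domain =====

-- B replaces A's per-pair set-intersection-and-sort over all face pairs by an inverted index
-- vertex -> faces, scattering each vertex in globally sorted order into the cells of every
-- pair of faces that contain it (objective: alternative algorithm; measured about the same).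

-- shared subscript helpers: matrix[i][j] = v  and  matrix[i][j]
def pvSet2 (m : List (List (List Int))) (i j : Int) (v : List Int) : List (List (List Int)) :=
  PySem.List.pySetD m i (PySem.List.pySetD (PySem.List.pyGetD m i []) j v)

def pvGet2 (m : List (List (List Int))) (i j : Int) : List Int :=
  PySem.List.pyGetD (PySem.List.pyGetD m i []) j []

-- ===== PORT A =====
-- Python's initial None cells are modelled by []: every cell is overwritten before it is read,
-- so the placeholder is never observable.
def build_faces_matrix (faces : List (List Int)) : List (List (List Int)) :=
  let n : Int := faces.length
  let matrix : List (List (List Int)) :=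
    (PySem.List.pyRange 0 n 1).map (fun _ => (PySem.List.pyRange 0 n 1).map (fun _ => ([] : List Int)))
  let matrix := (PySem.List.enumerate faces 0).foldl (fun m p =>
      pvSet2 m p.1 p.1 (PySem.List.sorted (PySem.Set.ofList p.2) (fun x => x) false)) matrix
  (PySem.List.pyRange 0 n 1).foldl (fun m i =>
    (PySem.List.pyRange (i + 1) n 1).foldl (fun m j =>
      let v := PySem.List.sorted
        (PySem.Set.inter (PySem.Set.ofList (PySem.List.pyGetD faces i []))
          (PySem.List.pyGetD faces j [])) (fun x => x) false
      pvSet2 (pvSet2 m i j v) j i v) m) matrix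

-- the inverted index built by B
def pvIndex (faces : List (List Int)) : PySem.Dict Int (List Int) :=
  (PySem.List.enumerate faces 0).foldl (fun d p =>
    (PySem.List.sorted (PySem.Set.ofList p.2) (fun x => x) false).foldl (fun d v =>
      d.insert v (d.getD v [] ++ [p.1])) d) PySem.Dict.empty

-- ===== PORT B =====
def build_faces_matrix_alt (faces : List (List Int)) : List (List (List Int)) :=
  let n : Int := faces.length
  let index : PySem.Dict Int (List Int) := pvIndex faces
  let matrix : List (List (List Int)) :=
    (PySem.List.pyRange 0 n 1).map (fun _ => (PySem.List.pyRange 0 n 1).map (fun _ => ([] : List Int)))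
  (PySem.List.sorted index.keys (fun x => x) false).foldl (fun m v =>
    let fs := index.getD v []
    fs.foldl (fun m i => fs.foldl (fun m j =>
      pvSet2 m i j (pvGet2 m i j ++ [v])) m) m) matrix

-- ===== PRECONDITION & SPEC =====
def Spec_build_faces_matrix (faces : List (List Int)) (out : List (List (List Int))) : Prop := out = build_faces_matrix_alt faces
instance (faces : List (List Int)) (out : List (List (List Int))) : Decidable (Spec_build_faces_matrix faces out) := by unfold Spec_build_faces_matrix; infer_instance

-- ===== CLAIM (what is proved, stated in full; the proofs are below) =====
def Claim_equal_build_faces_matrix : Prop := ∀ (faces : List (List Int)), Dom_build_faces_matrix faces → Spec_build_faces_matrix faces (build_faces_matrix faces)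

-- ===== LEMMAS AND PROOFS =====

-- the square matrix of side n with cell (i, j) = f i j
def pvR (n : Nat) (f : Nat → Nat → List Int) : List (List (List Int)) :=
  (List.range n).map (fun i => (List.range n).map (fun j => f i j))

-- the common target: cell (i, j) = sorted(set(faces[i]) & set(faces[j]))
def pvT (faces : List (List Int)) (i j : Nat) : List Int :=
  PySem.List.sorted
    (PySem.Set.inter (PySem.Set.ofList (faces.getD i [])) (faces.getD j [])) (fun x => x) false

theorem pv_set_map_range {α : Type} (n i : Nat) (f : Nat → α) (v : α) (_h : i < n) :
    ((List.range n).map f).set i v = (List.range n).map (fun k => if k = i then v else f k) := by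
  apply List.ext_getElem
  · simp
  · intro k h1 h2
    simp only [List.getElem_set, List.getElem_map, List.getElem_range]
    split_ifs with h3 h4 h4 <;> first | rfl | omega

theorem pvR_congr (n : Nat) (f g : Nat → Nat → List Int)
    (h : ∀ a, a < n → ∀ b, b < n → f a b = g a b) : pvR n f = pvR n g := by
  unfold pvR
  apply List.map_congr_left
  intro a ha
  apply List.map_congr_left
  intro b hb
  exact h a (List.mem_range.mp ha) b (List.mem_range.mp hb)

theorem pvSet2_R (n i j : Nat) (f : Nat → Nat → List Int) (v : List Int)
    (hi : i < n) (hj : j < n) :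
    pvSet2 (pvR n f) (i : Int) (j : Int) v
      = pvR n (fun a b => if a = i ∧ b = j then v else f a b) := by
  unfold pvSet2 pvR
  rw [PySem.List.pyGetD_natCast, PySem.List.pySetD_natCast, PySem.List.pySetD_natCast]
  rw [PySem.List.getD_map_range _ n i _ hi]
  rw [pv_set_map_range n j _ v hj, pv_set_map_range n i _ _ hi]
  apply List.map_congr_left
  intro a ha
  by_cases hai : a = i
  · subst hai
    rw [if_pos rfl]
    apply List.map_congr_left
    intro b hb
    by_cases hbj : b = j <;> simp [hbj]
  · simp [hai]

theorem pvGet2_R (n i j : Nat) (f : Nat → Nat → List Int) (hi : i < n) (hj : j < n) :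
    pvGet2 (pvR n f) (i : Int) (j : Int) = f i j := by
  unfold pvGet2 pvR
  rw [PySem.List.pyGetD_natCast, PySem.List.pyGetD_natCast]
  rw [PySem.List.getD_map_range _ n i _ hi, PySem.List.getD_map_range _ n j _ hj]

theorem pv_matrix0 (n : Nat) :
    ((PySem.List.pyRange 0 (n : Int) 1).map (fun _ =>
        (PySem.List.pyRange 0 (n : Int) 1).map (fun _ => ([] : List Int))))
      = pvR n (fun _ _ => []) := by
  unfold pvR
  rw [PySem.List.pyRange_zero_nat]
  simp [List.map_map, Function.comp_def]

-- sorted(set(xs) & ys) does not depend on the order of the two arguments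
theorem pvT_symm (faces : List (List Int)) (a b : Nat) : pvT faces a b = pvT faces b a := by
  unfold pvT
  apply PySem.List.sorted_eq_sorted_of_perm _ _ _ (fun x y h => h)
  apply (List.perm_ext_iff_of_nodup ((PySem.Set.nodup_ofList _).filter _) ((PySem.Set.nodup_ofList _).filter _)).mpr
  intro x
  simp [List.mem_filter, PySem.Set.mem_ofList]
  tauto

theorem pvT_diag (faces : List (List Int)) (a : Nat) :
    pvT faces a a = PySem.List.sorted (PySem.Set.ofList (faces.getD a [])) (fun x => x) false := by
  unfold pvT
  congr 1
  show List.filter _ _ = _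
  apply List.filter_eq_self.mpr
  intro x hx
  simpa [List.elem_iff] using (PySem.Set.mem_ofList _ x).mp hx

-- ---- A side ----

theorem pvA_diag_loop (n : Nat) (faces g : List (List Int)) (s : Nat) (f : Nat → Nat → List Int)
    (hle : s + g.length ≤ n)
    (hg : ∀ k, k < g.length → g.getD k [] = faces.getD (s + k) []) :
    (PySem.List.enumerate g (s : Int)).foldl (fun m p =>
        pvSet2 m p.1 p.1 (PySem.List.sorted (PySem.Set.ofList p.2) (fun x => x) false)) (pvR n f)
      = pvR n (fun a b =>
          if a = b ∧ s ≤ a ∧ a < s + g.length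
          then PySem.List.sorted (PySem.Set.ofList (faces.getD a [])) (fun x => x) false
          else f a b) := by
  induction g generalizing s f with
  | nil =>
    simp only [PySem.List.enumerate_nil, List.foldl_nil]
    apply pvR_congr
    intro a ha b hb
    rw [if_neg]
    rintro ⟨h1, h2, h3⟩
    simp at h3
    omega
  | cons x g ih =>
    have hs : s < n := by simp at hle; omega
    have hx : x = faces.getD s [] := by simpa using hg 0 (by simp)
    rw [PySem.List.enumerate_cons]
    simp only [List.foldl_cons]
    rw [pvSet2_R n s s f _ hs hs]
    have hcast : (s : Int) + 1 = ((s + 1 : Nat) : Int) := by omega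
    rw [hcast]
    rw [ih (s + 1) _ (by simp at hle ⊢; omega) (fun k hk => by
      have h := hg (k + 1) (by simp at hk ⊢; omega)
      simp only [List.getD_cons_succ] at h
      rw [h]; congr 1; omega)]
    apply pvR_congr
    intro a ha b hb
    simp only [List.length_cons]
    split_ifs <;> first | rfl | (exfalso; omega) | simp_all

theorem pvA_inner_loop (faces : List (List Int)) (n : Nat) (hn : n = faces.length)
    (i : Nat) (hi : i < n) (u : Nat) (hiu : i + 1 ≤ u) (hu : u ≤ n) (f : Nat → Nat → List Int) :
    (PySem.List.pyRange ((i : Int) + 1) (u : Int) 1).foldl (fun m j =>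
        pvSet2 (pvSet2 m (i : Int) j
          (PySem.List.sorted
            (PySem.Set.inter (PySem.Set.ofList (PySem.List.pyGetD faces (i : Int) []))
              (PySem.List.pyGetD faces j [])) (fun x => x) false)) j (i : Int)
          (PySem.List.sorted
            (PySem.Set.inter (PySem.Set.ofList (PySem.List.pyGetD faces (i : Int) []))
              (PySem.List.pyGetD faces j [])) (fun x => x) false)) (pvR n f)
      = pvR n (fun a b =>
          if a = i ∧ i < b ∧ b < u then pvT faces i b
          else if b = i ∧ i < a ∧ a < u then pvT faces i a
          else f a b) := by
  revert hu
  induction u, hiu using Nat.le_induction generalizing f with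
  | base =>
    intro hu
    rw [show ((i : Int) + 1) = ((i + 1 : Nat) : Int) by omega]
    rw [PySem.List.pyRange_one_eq_nil (le_refl _)]
    simp only [List.foldl_nil]
    apply pvR_congr
    intro a ha b hb
    split_ifs <;> first | rfl | (exfalso; omega)
  | succ u hu1 ih =>
    intro hu
    rw [show ((u + 1 : Nat) : Int) = (u : Int) + 1 by omega]
    rw [PySem.List.pyRange_one_succ_right (by omega)]
    rw [List.foldl_append, ih f (by omega)]
    simp only [List.foldl_cons, List.foldl_nil, PySem.List.pyGetD_natCast]
    rw [pvSet2_R n i u _ _ hi (by omega), pvSet2_R n u i _ _ (by omega) hi]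
    apply pvR_congr
    intro a ha b hb
    have hv : PySem.List.sorted
        (PySem.Set.inter (PySem.Set.ofList (faces.getD i [])) (faces.getD u [])) (fun x => x) false
        = pvT faces i u := rfl
    rw [hv]
    split_ifs <;> first | rfl | (exfalso; omega) | simp_all

theorem pvT_congr (faces : List (List Int)) (x y x' y' : Nat) (hx : x = x') (hy : y = y') :
    pvT faces x y = pvT faces x' y' := by rw [hx, hy]

theorem pvA_outer_loop (faces : List (List Int)) (n : Nat) (hn : n = faces.length)
    (t : Nat) (ht : t ≤ n) (f : Nat → Nat → List Int) :
    (PySem.List.pyRange 0 (t : Int) 1).foldl (fun m i =>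
        (PySem.List.pyRange (i + 1) (n : Int) 1).foldl (fun m j =>
          pvSet2 (pvSet2 m i j
            (PySem.List.sorted
              (PySem.Set.inter (PySem.Set.ofList (PySem.List.pyGetD faces i []))
                (PySem.List.pyGetD faces j [])) (fun x => x) false)) j i
            (PySem.List.sorted
              (PySem.Set.inter (PySem.Set.ofList (PySem.List.pyGetD faces i []))
                (PySem.List.pyGetD faces j [])) (fun x => x) false)) m) (pvR n f)
      = pvR n (fun a b =>
          if a ≠ b ∧ (a < t ∨ b < t) then pvT faces (min a b) (max a b) else f a b) := by
  induction t generalizing f with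
  | zero =>
    rw [show ((0 : Nat) : Int) = 0 from rfl, PySem.List.pyRange_one_eq_nil (le_refl _)]
    simp only [List.foldl_nil]
    apply pvR_congr
    intro a ha b hb
    split_ifs <;> first | rfl | (exfalso; omega)
  | succ t ih =>
    rw [show ((t + 1 : Nat) : Int) = (t : Int) + 1 by omega]
    rw [PySem.List.pyRange_one_succ_right (by positivity)]
    rw [List.foldl_append, ih (by omega) f]
    simp only [List.foldl_cons, List.foldl_nil]
    rw [pvA_inner_loop faces n hn t (by omega) n (by omega) (le_refl _)]
    apply pvR_congr
    intro a ha b hb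
    split_ifs <;> first | rfl | (exfalso; omega) | (apply pvT_congr <;> omega)

theorem pvA_eq (faces : List (List Int)) :
    build_faces_matrix faces = pvR faces.length (pvT faces) := by
  have hn : faces.length = faces.length := rfl
  simp only [build_faces_matrix]
  rw [pv_matrix0 faces.length]
  rw [show (0 : Int) = ((0 : Nat) : Int) from rfl]
  rw [pvA_diag_loop faces.length faces faces 0 _ (by omega) (fun k hk => by simp)]
  simp only [Nat.cast_zero]
  rw [pvA_outer_loop faces faces.length rfl faces.length (le_refl _) _]
  apply pvR_congr
  intro a ha b hb
  by_cases hab : a = b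
  · subst hab
    rw [if_neg (by omega), if_pos (by omega), pvT_diag]
  · rw [if_pos ⟨hab, by omega⟩]
    rcases Nat.lt_or_ge a b with h | h
    · rw [Nat.min_eq_left (by omega), Nat.max_eq_right (by omega)]
    · rw [Nat.min_eq_right (by omega), Nat.max_eq_left (by omega), pvT_symm]

-- ---- B side ----

def pvFs (faces : List (List Int)) (v : Int) : List Int :=
  List.map (fun k : Nat => (k : Int)) ((List.range faces.length).filter (fun k => decide (v ∈ faces.getD k [])))

theorem pvB_inner_index (vs : List Int) (i : Int) (d : PySem.Dict Int (List Int)) (v : Int)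
    (hnd : vs.Nodup) :
    (vs.foldl (fun d u => d.insert u (d.getD u [] ++ [i])) d).getD v []
      = if v ∈ vs then d.getD v [] ++ [i] else d.getD v [] := by
  induction vs generalizing d with
  | nil => simp
  | cons u vs ih =>
    have hu : u ∉ vs := (List.nodup_cons.mp hnd).1
    simp only [List.foldl_cons]
    rw [ih _ (List.nodup_cons.mp hnd).2]
    by_cases hv : v ∈ vs
    · rw [if_pos (List.mem_cons_of_mem _ hv), if_pos hv, PySem.Dict.getD_insert,
        if_neg (by rintro rfl; exact hu hv)]
    · by_cases hvu : v = u
      · subst hvu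
        rw [if_neg hv, if_pos (List.mem_cons_self), PySem.Dict.getD_insert, if_pos rfl]
      · rw [if_neg hv, if_neg (by simp [hvu, hv]), PySem.Dict.getD_insert, if_neg hvu]

theorem pvB_index_getD (g : List (List Int)) (s : Nat) (d : PySem.Dict Int (List Int)) (v : Int) :
    ((PySem.List.enumerate g (s : Int)).foldl (fun d p =>
        (PySem.List.sorted (PySem.Set.ofList p.2) (fun x => x) false).foldl (fun d v =>
          d.insert v (d.getD v [] ++ [p.1])) d) d).getD v []
      = d.getD v []
        ++ ((List.range g.length).filter (fun k => decide (v ∈ g.getD k []))).map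
            (fun k => ((s + k : Nat) : Int)) := by
  induction g generalizing s d with
  | nil => simp [PySem.List.enumerate_nil]
  | cons x g ih =>
    rw [PySem.List.enumerate_cons]
    simp only [List.foldl_cons]
    rw [show (s : Int) + 1 = ((s + 1 : Nat) : Int) by omega]
    rw [ih (s + 1)]
    rw [pvB_inner_index _ _ _ _ ((PySem.List.sorted_perm _ _ _).nodup_iff.mpr (PySem.Set.nodup_ofList x))]
    rw [List.length_cons, List.range_succ_eq_map]
    simp only [List.filter_cons, List.getD_cons_zero, List.getD_cons_succ, List.filter_map,
      Function.comp_def]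
    have hmap : List.map (fun k => ((s + 1 + k : Nat) : Int))
        (List.filter (fun k => decide (v ∈ g.getD k [])) (List.range g.length))
        = List.map (fun k => ((s + (k + 1) : Nat) : Int))
        (List.filter (fun k => decide (v ∈ g.getD k [])) (List.range g.length)) := by
      apply List.map_congr_left; intro k hk; congr 1; omega
    by_cases hvx : v ∈ x
    · rw [if_pos (by simp [PySem.List.mem_sorted, PySem.Set.mem_ofList, hvx])]
      simp only [hvx, decide_true, if_true, List.cons_append, List.nil_append, List.append_assoc]
      rw [hmap]
      simp only [List.map_cons, List.map_map, Function.comp_def, Nat.succ_eq_add_one,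
        Nat.add_zero]
    · rw [if_neg (by simp [PySem.List.mem_sorted, PySem.Set.mem_ofList, hvx])]
      simp only [hvx, decide_false, Bool.false_eq_true, if_false]
      rw [hmap]
      simp only [List.map_map, Function.comp_def, Nat.succ_eq_add_one]

theorem pvB_index_keys (g : List (List Int)) (s : Nat) (d : PySem.Dict Int (List Int)) :
    ((PySem.List.enumerate g (s : Int)).foldl (fun d p =>
        (PySem.List.sorted (PySem.Set.ofList p.2) (fun x => x) false).foldl (fun d v =>
          d.insert v (d.getD v [] ++ [p.1])) d) d).keys
      = PySem.Set.update d.keys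
          (g.flatMap (fun x => PySem.List.sorted (PySem.Set.ofList x) (fun x => x) false)) := by
  induction g generalizing s d with
  | nil => simp [PySem.List.enumerate_nil, PySem.Set.update]
  | cons x g ih =>
    rw [PySem.List.enumerate_cons]
    simp only [List.foldl_cons]
    rw [show (s : Int) + 1 = ((s + 1 : Nat) : Int) by omega]
    rw [ih (s + 1)]
    rw [PySem.Dict.keys_foldl_insert]
    simp only [List.flatMap_cons]
    unfold PySem.Set.update
    rw [List.foldl_append]

theorem pvIndex_getD (faces : List (List Int)) (v : Int) :
    (pvIndex faces).getD v [] = pvFs faces v := by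
  unfold pvIndex pvFs
  rw [show (0 : Int) = ((0 : Nat) : Int) from rfl, pvB_index_getD]
  simp only [PySem.Dict.getD, PySem.Dict.get?, PySem.Dict.empty,
    List.find?_nil, Option.map_none, Option.getD_none, List.nil_append]
  apply List.map_congr_left
  intro k hk
  simp

theorem pvIndex_keys_mem (faces : List (List Int)) (v : Int) :
    v ∈ (pvIndex faces).keys ↔ ∃ g ∈ faces, v ∈ g := by
  unfold pvIndex
  rw [show (0 : Int) = ((0 : Nat) : Int) from rfl, pvB_index_keys]
  simp [PySem.Set.mem_update, PySem.Dict.empty, PySem.Dict.keys_mk, PySem.List.mem_sorted,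
    PySem.Set.mem_ofList]

theorem pvIndex_keys_nodup (faces : List (List Int)) : (pvIndex faces).keys.Nodup := by
  unfold pvIndex
  rw [show (0 : Int) = ((0 : Nat) : Int) from rfl, pvB_index_keys]
  apply PySem.Set.nodup_update
  simp [PySem.Dict.empty, PySem.Dict.keys_mk]

theorem pv_mem_pvFs (faces : List (List Int)) (v : Int) (x : Int) :
    x ∈ pvFs faces v ↔ ∃ k : Nat, k < faces.length ∧ x = (k : Int) ∧ v ∈ faces.getD k [] := by
  unfold pvFs
  constructor
  · intro hx
    rcases List.mem_map.mp hx with ⟨k, hk1, rfl⟩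
    rcases List.mem_filter.mp hk1 with ⟨hk2, hm⟩
    exact ⟨k, List.mem_range.mp hk2, rfl, of_decide_eq_true hm⟩
  · rintro ⟨k, hk, rfl, hm⟩
    exact List.mem_map.mpr ⟨k, List.mem_filter.mpr ⟨List.mem_range.mpr hk, decide_eq_true hm⟩, rfl⟩

theorem pvFs_nodup (faces : List (List Int)) (v : Int) : (pvFs faces v).Nodup := by
  unfold pvFs
  apply List.Nodup.map
  · intro a b h
    simpa using h
  · exact (List.nodup_range).filter _

theorem pvB_scatter_inner (n : Nat) (f : Nat → Nat → List Int) (v : Int) (ki : Nat) (hki : ki < n)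
    (js : List Int) (hnd : js.Nodup)
    (hjs : ∀ x ∈ js, ∃ k : Nat, k < n ∧ x = (k : Int)) :
    (js.foldl (fun m j => pvSet2 m (ki : Int) j (pvGet2 m (ki : Int) j ++ [v])) (pvR n f))
      = pvR n (fun a b => if a = ki ∧ (b : Int) ∈ js then f a b ++ [v] else f a b) := by
  induction js generalizing f with
  | nil =>
    simp only [List.foldl_nil]
    apply pvR_congr; intro a ha b hb
    simp
  | cons j js ih =>
    obtain ⟨kj, hkj, rfl⟩ := hjs _ (List.mem_cons_self)
    have hj : ((kj : Int)) ∉ js := (List.nodup_cons.mp hnd).1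
    simp only [List.foldl_cons]
    rw [pvGet2_R n ki kj f hki hkj, pvSet2_R n ki kj f _ hki hkj]
    rw [ih _ (List.nodup_cons.mp hnd).2 (fun x hx => hjs x (List.mem_cons_of_mem _ hx))]
    apply pvR_congr; intro a ha b hb
    split_ifs <;> simp_all [List.mem_cons]

theorem pvB_scatter_outer (n : Nat) (f : Nat → Nat → List Int) (v : Int) (fs is : List Int)
    (hnd : is.Nodup) (hfs : ∀ x ∈ fs, ∃ k : Nat, k < n ∧ x = (k : Int))
    (his : ∀ x ∈ is, ∃ k : Nat, k < n ∧ x = (k : Int))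
    (hnfs : fs.Nodup) :
    (is.foldl (fun m i => fs.foldl (fun m j => pvSet2 m i j (pvGet2 m i j ++ [v])) m) (pvR n f))
      = pvR n (fun a b => if (a : Int) ∈ is ∧ (b : Int) ∈ fs then f a b ++ [v] else f a b) := by
  induction is generalizing f with
  | nil =>
    simp only [List.foldl_nil]
    apply pvR_congr; intro a ha b hb
    simp
  | cons i is ih =>
    obtain ⟨ki, hki, rfl⟩ := his _ (List.mem_cons_self)
    have hi : ((ki : Int)) ∉ is := (List.nodup_cons.mp hnd).1
    simp only [List.foldl_cons]
    rw [pvB_scatter_inner n f v ki hki fs hnfs hfs]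
    rw [ih _ (List.nodup_cons.mp hnd).2 (fun x hx => his x (List.mem_cons_of_mem _ hx))]
    apply pvR_congr; intro a ha b hb
    split_ifs <;> simp_all [List.mem_cons]

theorem pvB_vertex_loop (faces : List (List Int)) (ws : List Int) (f : Nat → Nat → List Int) :
    (ws.foldl (fun m v =>
        (pvFs faces v).foldl (fun m i => (pvFs faces v).foldl (fun m j =>
          pvSet2 m i j (pvGet2 m i j ++ [v])) m) m) (pvR faces.length f))
      = pvR faces.length (fun a b =>
          f a b ++ ws.filter (fun v => decide (v ∈ faces.getD a []) && decide (v ∈ faces.getD b []))) := by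
  induction ws generalizing f with
  | nil =>
    simp only [List.foldl_nil]
    apply pvR_congr; intro a ha b hb
    simp
  | cons w ws ih =>
    simp only [List.foldl_cons]
    have hmem : ∀ x ∈ pvFs faces w, ∃ k : Nat, k < faces.length ∧ x = (k : Int) := by
      intro x hx
      rcases (pv_mem_pvFs faces w x).mp hx with ⟨k, hk, rfl, -⟩
      exact ⟨k, hk, rfl⟩
    rw [pvB_scatter_outer faces.length f w (pvFs faces w) (pvFs faces w)
      (pvFs_nodup faces w) hmem hmem (pvFs_nodup faces w)]
    rw [pvR_congr faces.length _
      (fun a b => if decide (w ∈ faces.getD a []) && decide (w ∈ faces.getD b [])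
        then f a b ++ [w] else f a b)
      (by
        intro a ha b hb
        have hma : ((a : Int)) ∈ pvFs faces w ↔ w ∈ faces.getD a [] := by
          rw [pv_mem_pvFs]
          constructor
          · rintro ⟨k, hk, hak, hm⟩
            have : a = k := by exact_mod_cast hak
            exact this ▸ hm
          · intro hm; exact ⟨a, ha, rfl, hm⟩
        have hmb : ((b : Int)) ∈ pvFs faces w ↔ w ∈ faces.getD b [] := by
          rw [pv_mem_pvFs]
          constructor
          · rintro ⟨k, hk, hbk, hm⟩
            have : b = k := by exact_mod_cast hbk
            exact this ▸ hm
          · intro hm; exact ⟨b, hb, rfl, hm⟩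
        by_cases h1 : w ∈ faces.getD a [] <;> by_cases h2 : w ∈ faces.getD b [] <;>
          simp [hma, hmb])]
    rw [ih]
    apply pvR_congr; intro a ha b hb
    by_cases h : (decide (w ∈ faces.getD a []) && decide (w ∈ faces.getD b [])) = true
    · simp only [h, if_true, List.filter_cons, List.append_assoc, List.cons_append,
        List.nil_append]
    · simp only [h, List.filter_cons]
      simp

theorem pvB_cell (faces : List (List Int)) (a b : Nat) (ha : a < faces.length) (_hb : b < faces.length) :
    (PySem.List.sorted (pvIndex faces).keys (fun x => x) false).filter
        (fun v => decide (v ∈ faces.getD a []) && decide (v ∈ faces.getD b []))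
      = pvT faces a b := by
  have hnd : (PySem.List.sorted (pvIndex faces).keys (fun x => x) false).Nodup :=
    (PySem.List.sorted_perm _ _ _).nodup_iff.mpr (pvIndex_keys_nodup faces)
  have hlt : (PySem.List.sorted (pvIndex faces).keys (fun x => x) false).Pairwise (· < ·) := by
    have h1 := PySem.List.sorted_pairwise (pvIndex faces).keys (fun x => x)
    exact (h1.and hnd).imp (fun h => lt_of_le_of_ne h.1 h.2)
  unfold pvT
  symm
  apply PySem.List.sorted_eq_of_perm_of_pairwise_lt
  · apply (List.perm_ext_iff_of_nodup (hnd.filter _)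
      ((PySem.Set.nodup_ofList _).filter _)).mpr
    intro x
    rw [List.mem_filter, List.mem_filter, PySem.List.mem_sorted]
    simp only [Bool.and_eq_true, decide_eq_true_eq, PySem.Set.mem_ofList]
    constructor
    · rintro ⟨-, h1, h2⟩
      exact ⟨h1, by simpa [List.elem_iff] using h2⟩
    · rintro ⟨h1, h2⟩
      have h2' : x ∈ faces.getD b [] := by simpa [List.elem_iff] using h2
      refine ⟨(pvIndex_keys_mem faces x).mpr ⟨faces.getD a [], ?_, h1⟩, h1, h2'⟩
      rw [List.getD_eq_getElem?_getD, List.getElem?_eq_getElem ha]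
      exact List.getElem_mem ha
  · exact List.Pairwise.sublist List.filter_sublist hlt

theorem pvB_eq (faces : List (List Int)) :
    build_faces_matrix_alt faces = pvR faces.length (pvT faces) := by
  simp only [build_faces_matrix_alt]
  rw [pv_matrix0 faces.length]
  simp only [pvIndex_getD]
  rw [pvB_vertex_loop]
  apply pvR_congr
  intro a ha b hb
  rw [← pvB_cell faces a b ha hb, List.nil_append]

-- ===== VERDICT (by name: the statement is the Claim_ definition above) =====
theorem build_faces_matrix_spec : Claim_equal_build_faces_matrix := by
  intro faces _
  unfold Spec_build_faces_matrix
  rw [pvA_eq, pvB_eq]
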